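-- pv_equiv track=rewrite | github.com/Suge8/bao | app/backend/_hub_streaming.py | _summarize_attachment_names
-- ===== SOURCE A (Python) =====
-- def _summarize_attachment_names(names: list[str]) -> str:
--     cleaned = [name.strip() for name in names if isinstance(name, str) and name.strip()]
--     if not cleaned:
--         return ""
--     if len(cleaned) <= 3:
--         return ", ".join(cleaned)
--     preview = ", ".join(cleaned[:3])
--     return f"{preview} +{len(cleaned) - 3}"
-- ===== SOURCE B (Python) =====
-- def _summarize_attachment_names(names: list[str]) -> str:
--     out = ""
--     shown = 0
--     for i, name in enumerate(names):
--         s = name.strip() if isinstance(name, str) else ""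
--         if not s:
--             continue
--         if shown == 3:
--             extra = 1 + sum(1 for n in names[i + 1:]
--                             if isinstance(n, str) and n.strip())
--             return f"{out} +{extra}"
--         out = s if shown == 0 else f"{out}, {s}"
--         shown += 1
--     return out
-- ===== Notes on version B (the rewrite author's own statement) =====
-- stated objective: alternative
-- what changed: B builds the output string directly by recursion, interleaving separators and collapsing the tail into a ' +k' suffix (counted on demand) the moment a fourth valid name appears, instead of materializing a cleaned list, slicing and joining it.
import Mathlib
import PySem

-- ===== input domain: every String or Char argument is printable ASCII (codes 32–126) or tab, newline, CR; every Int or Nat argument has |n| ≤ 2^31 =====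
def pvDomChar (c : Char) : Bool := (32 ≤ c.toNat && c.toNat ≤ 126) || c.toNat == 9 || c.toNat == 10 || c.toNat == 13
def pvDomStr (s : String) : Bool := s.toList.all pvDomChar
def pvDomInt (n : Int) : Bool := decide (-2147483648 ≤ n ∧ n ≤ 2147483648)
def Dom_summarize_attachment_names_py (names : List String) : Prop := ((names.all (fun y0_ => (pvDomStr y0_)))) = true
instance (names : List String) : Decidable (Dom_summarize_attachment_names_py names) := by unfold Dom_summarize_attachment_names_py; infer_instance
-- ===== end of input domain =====

-- B builds the preview string by direct recursion (separators interleaved, ' +k' suffix computed on demand) instead of materializing, slicing and joining a cleaned list (alternative decomposition, same cost).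


-- ===== PORT A =====
def summarize_attachment_names_py (names : List String) : String :=
  let cleaned := (names.filter (fun name => PySem.Str.strip name ≠ "")).map PySem.Str.strip
  if cleaned = [] then ""
  else if cleaned.length ≤ 3 then PySem.Str.join ", " cleaned
  else
    let preview := PySem.Str.join ", " (PySem.List.slice cleaned none (some 3))
    preview ++ " +" ++ PySem.Int.toStr ((cleaned.length : Int) - 3)

-- ===== PORT B =====
-- count of names that survive strip (the sum(...) generator)
def pvCountValid (names : List String) : Int :=
  match names with
  | [] => 0
  | head :: rest => (if PySem.Str.strip head ≠ "" then 1 else 0) + pvCountValid rest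

-- the for-loop: accumulates the output string, early-returns with the ' +k' suffix;
-- names[i+1:] at position i is the tail of the remaining list
def pvLoop (names : List String) (out : String) (shown : Int) : String :=
  match names with
  | [] => out
  | name :: rest =>
    let s := PySem.Str.strip name
    if s = "" then pvLoop rest out shown
    else if shown = 3 then out ++ " +" ++ PySem.Int.toStr (1 + pvCountValid rest)
    else pvLoop rest (if shown = 0 then s else out ++ ", " ++ s) (shown + 1)

def summarize_attachment_names_py_alt (names : List String) : String :=
  pvLoop names "" 0

-- ===== PRECONDITION & SPEC =====
def Spec_summarize_attachment_names_py (names : List String) (out : String) : Prop := out = summarize_attachment_names_py_alt names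
instance (names : List String) (out : String) : Decidable (Spec_summarize_attachment_names_py names out) := by unfold Spec_summarize_attachment_names_py; infer_instance

-- ===== CLAIM (what is proved, stated in full; the proofs are below) =====
def Claim_equal_summarize_attachment_names_py : Prop := ∀ (names : List String), Dom_summarize_attachment_names_py names → Spec_summarize_attachment_names_py names (summarize_attachment_names_py names)

-- ===== LEMMAS AND PROOFS =====
-- the cleaned list of A
def pvCleaned (names : List String) : List String :=
  (names.filter (fun name => PySem.Str.strip name ≠ "")).map PySem.Str.strip

theorem pvCountValid_eq (names : List String) :
    pvCountValid names = ((pvCleaned names).length : Int) := by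
  induction names with
  | nil => simp [pvCountValid, pvCleaned]
  | cons h t ih =>
    by_cases hs : PySem.Str.strip h = ""
    · simp [pvCountValid, pvCleaned, hs] at *
      simpa [hs] using ih
    · simp [pvCountValid, pvCleaned, List.filter_cons, hs] at *
      rw [ih]; push_cast; ring

-- pvLoop as a function of the cleaned list
def pvLoopC (cleaned : List String) (out : String) (shown : Int) : String :=
  match cleaned with
  | [] => out
  | s :: rest =>
    if shown = 3 then out ++ " +" ++ PySem.Int.toStr (1 + (rest.length : Int))
    else pvLoopC rest (if shown = 0 then s else out ++ ", " ++ s) (shown + 1)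

theorem pvLoop_eq_loopC (names : List String) (out : String) (shown : Int) :
    pvLoop names out shown = pvLoopC (pvCleaned names) out shown := by
  induction names generalizing out shown with
  | nil => simp [pvLoop, pvCleaned, pvLoopC]
  | cons h t ih =>
    by_cases hs : PySem.Str.strip h = ""
    · simpa [pvLoop, pvCleaned, hs] using ih out shown
    · by_cases h3 : shown = (3 : Int)
      · have hc : pvCountValid t = ((pvCleaned t).length : Int) := pvCountValid_eq t
        simp [pvLoop, pvCleaned, hs, h3, pvLoopC, hc]
      · simp [pvLoop, pvCleaned, hs, h3, pvLoopC, ih]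

theorem join_two (a b : String) : PySem.Str.join ", " [a, b] = a ++ ", " ++ b := by
  apply String.toList_injective
  simp [PySem.Str.join, PySem.Chars.join, List.intercalate]

theorem join_three (a b c : String) :
    PySem.Str.join ", " [a, b, c] = a ++ ", " ++ b ++ ", " ++ c := by
  apply String.toList_injective
  simp [PySem.Str.join, PySem.Chars.join, List.intercalate]

-- ===== VERDICT (by name: the statement is the Claim_ definition above) =====
theorem pvMain (L : List String) :
    (if L = [] then ""
     else if L.length ≤ 3 then PySem.Str.join ", " L
     else PySem.Str.join ", " (PySem.List.slice L none (some 3)) ++ " +" ++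
       PySem.Int.toStr ((L.length : Int) - 3)) = pvLoopC L "" 0 := by
  match L with
  | [] => simp [pvLoopC]
  | [a] => simp [pvLoopC, PySem.Str.join]
  | [a, b] => simp [join_two]; norm_num [pvLoopC]
  | [a, b, c] => simp [join_three]; norm_num [pvLoopC]
  | a :: b :: c :: d :: rest =>
    have hlen : ¬ ((a :: b :: c :: d :: rest).length ≤ 3) := by simp
    rw [if_neg (by simp : (a :: b :: c :: d :: rest) ≠ []), if_neg hlen]
    have hslice : PySem.List.slice (a :: b :: c :: d :: rest) none (some 3) = [a, b, c] := by
      rw [show ((3:Int)) = ((3:Nat):Int) by norm_num, PySem.List.slice_to_natCast]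
      rfl
    rw [hslice, join_three]
    norm_num [pvLoopC]
    have h4 : ∀ x : Int, PySem.Int.toStr (x + 1 + 1 + 1 + 1 - 3) = PySem.Int.toStr (1 + x) := by
      intro x; congr 1; ring
    simp [String.append_assoc, h4]

theorem summarize_attachment_names_py_spec : Claim_equal_summarize_attachment_names_py := by
  intro names _
  unfold Spec_summarize_attachment_names_py summarize_attachment_names_py summarize_attachment_names_py_alt
  rw [pvLoop_eq_loopC names "" 0]
  exact pvMain (pvCleaned names)
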